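-- pv_equiv track=rewrite | github.com/SW-in-beta/algorithm | 프로그래머스/2/150368. 이모티콘 할인행사/이모티콘 할인행사.py | solution
-- ===== SOURCE A (Python) =====
-- from itertools import product
-- from dataclasses import dataclass
--
-- @dataclass
-- class Emoticon:
--     price: int
--     discount: int
--
--     @property
--     def discounted_price(self):
--         return self.price * (100 - self.discount) // 100
--
-- def solution(users, emoticons):
--     emoticon_cases = [[Emoticon(p, d) for p, d in zip(emoticons, discount)] for discount in product([10, 20, 30, 40], repeat=len(emoticons))]
--
--     max_plus = 0
--     max_total = 0
--     for emoticon_case in emoticon_cases: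
--         plus = 0
--         total = 0
--         for discount, threshold in users:
--             user_total = 0
--             for emoticon in emoticon_case:
--                 if emoticon.discount < discount:
--                     continue
--                 user_total += emoticon.discounted_price
--             if user_total >= threshold:
--                 plus += 1
--             else:
--                 total += user_total
--         if max_plus < plus:
--             max_plus = plus
--             max_total = total
--         elif max_plus == plus:
--             max_total = max(max_total, total)
--
--     return [max_plus, max_total]
-- ===== SOURCE B (Python) =====
-- def solution(users, emoticons):
--     def search(remaining, chosen, best_plus, best_total):
--         if not remaining:
--             plus = 0
--             total = 0
--             for dc, tp in users:
--                 s = sum(p * (100 - d) // 100 for p, d in chosen if d >= dc)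
--                 if s >= tp:
--                     plus += 1
--                 else:
--                     total += s
--             if best_plus < plus:
--                 return plus, total
--             if best_plus == plus:
--                 return plus, max(best_total, total)
--             return best_plus, best_total
--         for d in (10, 20, 30, 40):
--             best_plus, best_total = search(remaining[1:], chosen + [(remaining[0], d)], best_plus, best_total)
--         return best_plus, best_total
--
--     bp, bt = search(emoticons, [], 0, 0)
--     return [bp, bt]
-- ===== Notes on version B (the rewrite author's own statement) =====
-- stated objective: simpler
-- what changed: Replaces the Emoticon dataclass and the materialised itertools.product list of all discount cases by a recursive search that picks one discount per emoticon, threading the running (max_plus, max_total) through the calls and evaluating users at each leaf with a sum over the chosen (price, discount) pairs.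
import Mathlib
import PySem

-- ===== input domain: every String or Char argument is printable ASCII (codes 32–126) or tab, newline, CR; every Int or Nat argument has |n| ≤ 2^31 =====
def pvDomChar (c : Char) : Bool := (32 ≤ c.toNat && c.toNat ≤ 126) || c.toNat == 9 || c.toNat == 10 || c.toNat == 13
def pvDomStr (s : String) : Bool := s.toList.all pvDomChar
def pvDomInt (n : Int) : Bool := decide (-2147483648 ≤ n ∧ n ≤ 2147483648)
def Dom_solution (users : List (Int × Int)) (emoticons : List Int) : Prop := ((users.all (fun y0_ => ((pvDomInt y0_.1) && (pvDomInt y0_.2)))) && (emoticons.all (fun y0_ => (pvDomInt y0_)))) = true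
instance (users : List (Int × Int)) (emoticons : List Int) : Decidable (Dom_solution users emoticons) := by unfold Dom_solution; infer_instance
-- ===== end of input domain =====

-- B replaces A's materialised itertools.product list by a recursive search over the
-- emoticons that threads the running best through the calls (simpler decomposition, no
-- Emoticon dataclass); return values proved equal, no speed claim.

-- ===== PORT A =====
-- itertools.product([10,20,30,40], repeat=n) in its exact order (first factor outermost)
def combosA : Nat → List (List Int)
  | 0 => [[]]
  | n + 1 => [(10 : Int), 20, 30, 40].flatMap (fun d => (combosA n).map (fun ds => d :: ds))

-- an Emoticon(p, d) is represented as the pair (p, d); discounted_price inlined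
def solution (users : List (Int × Int)) (emoticons : List Int) : List Int :=
  let emoticonCases := (combosA emoticons.length).map (fun ds => emoticons.zip ds)
  let st := emoticonCases.foldl (fun (st : Int × Int) ec =>
      let pt := users.foldl (fun (pt : Int × Int) u =>
          let ut := ec.foldl (fun ut e =>
              if e.2 < u.1 then ut
              else ut + PySem.Int.floordiv (e.1 * (100 - e.2)) 100) 0
          if u.2 ≤ ut then (pt.1 + 1, pt.2) else (pt.1, pt.2 + ut)) (0, 0)
      if st.1 < pt.1 then pt
      else if st.1 = pt.1 then (st.1, max st.2 pt.2)
      else st) (0, 0)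
  [st.1, st.2]

-- ===== PORT B =====
-- the leaf evaluation: plus/total for one full choice of discounts (chosen = (price, discount) pairs)
def evalB (users : List (Int × Int)) (chosen : List (Int × Int)) : Int × Int :=
  users.foldl (fun (pt : Int × Int) u =>
    let s := ((chosen.filter (fun pd => u.1 ≤ pd.2)).map
        (fun pd => PySem.Int.floordiv (pd.1 * (100 - pd.2)) 100)).sum
    if u.2 ≤ s then (pt.1 + 1, pt.2) else (pt.1, pt.2 + s)) (0, 0)

def searchB (users : List (Int × Int)) : List Int → List (Int × Int) → Int × Int → Int × Int
  | [], chosen, best =>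
      let pt := evalB users chosen
      if best.1 < pt.1 then pt
      else if best.1 = pt.1 then (pt.1, max best.2 pt.2)
      else best
  | p :: rest, chosen, best =>
      [(10 : Int), 20, 30, 40].foldl (fun b d => searchB users rest (chosen ++ [(p, d)]) b) best

def solution_alt (users : List (Int × Int)) (emoticons : List Int) : List Int :=
  let b := searchB users emoticons [] (0, 0)
  [b.1, b.2]

-- ===== PRECONDITION & SPEC =====
def Spec_solution (users : List (Int × Int)) (emoticons : List Int) (out : List Int) : Prop := out = solution_alt users emoticons
instance (users : List (Int × Int)) (emoticons : List Int) (out : List Int) : Decidable (Spec_solution users emoticons out) := by unfold Spec_solution; infer_instance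

-- ===== CLAIM (what is proved, stated in full; the proofs are below) =====
def Claim_equal_solution : Prop := ∀ (users : List (Int × Int)) (emoticons : List Int), Dom_solution users emoticons → Spec_solution users emoticons (solution users emoticons)

-- ===== LEMMAS AND PROOFS =====

-- the shared best-update rule (proof-only helper)
def upd (st pt : Int × Int) : Int × Int :=
  if st.1 < pt.1 then pt else if st.1 = pt.1 then (st.1, max st.2 pt.2) else st

theorem inner_eq (u : Int × Int) (ec : List (Int × Int)) (acc : Int) :
    ec.foldl (fun ut e =>
        if e.2 < u.1 then ut
        else ut + PySem.Int.floordiv (e.1 * (100 - e.2)) 100) acc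
    = acc + ((ec.filter (fun pd => u.1 ≤ pd.2)).map
        (fun pd => PySem.Int.floordiv (pd.1 * (100 - pd.2)) 100)).sum := by
  induction ec generalizing acc with
  | nil => simp
  | cons e t ih =>
    simp only [List.foldl_cons]
    by_cases h : e.2 < u.1
    · rw [if_pos h, ih]
      simp [not_le.mpr h]
    · rw [if_neg h, ih]
      simp [not_lt.mp h, add_assoc]

theorem stepA_eq (users : List (Int × Int)) (ec : List (Int × Int)) :
    users.foldl (fun (pt : Int × Int) u =>
        let ut := ec.foldl (fun ut e =>
            if e.2 < u.1 then ut
            else ut + PySem.Int.floordiv (e.1 * (100 - e.2)) 100) 0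
        if u.2 ≤ ut then (pt.1 + 1, pt.2) else (pt.1, pt.2 + ut)) (0, 0)
    = evalB users ec := by
  unfold evalB
  congr 1
  funext pt u
  simp only [inner_eq, zero_add]

theorem leafB_eq (users : List (Int × Int)) (chosen : List (Int × Int)) (best : Int × Int) :
    searchB users [] chosen best = upd best (evalB users chosen) := by
  unfold searchB upd
  by_cases h1 : best.1 < (evalB users chosen).1
  · simp [h1]
  · by_cases h2 : best.1 = (evalB users chosen).1
    · simp [h2]
    · simp [h1, h2]

theorem searchB_eq_foldl (users : List (Int × Int)) (rem : List Int)
    (chosen : List (Int × Int)) (best : Int × Int) :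
    searchB users rem chosen best
    = (combosA rem.length).foldl
        (fun st ds => upd st (evalB users (chosen ++ rem.zip ds))) best := by
  induction rem generalizing chosen best with
  | nil => simp [combosA, leafB_eq]
  | cons p rest ih =>
    show [(10 : Int), 20, 30, 40].foldl
        (fun b d => searchB users rest (chosen ++ [(p, d)]) b) best = _
    simp only [List.length_cons, combosA, List.flatMap_cons, List.flatMap_nil,
      List.foldl_append, List.foldl_map, List.foldl_cons, List.foldl_nil,
      List.append_nil, List.zip_cons_cons, ih, List.append_assoc, List.singleton_append]

theorem solution_eq (users : List (Int × Int)) (emoticons : List Int) :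
    solution users emoticons = solution_alt users emoticons := by
  unfold solution solution_alt
  rw [searchB_eq_foldl]
  simp only [List.foldl_map, stepA_eq, List.nil_append]
  rfl

-- ===== VERDICT (by name: the statement is the Claim_ definition above) =====
theorem solution_spec : Claim_equal_solution := by
  intro users emoticons _
  show _ = _
  exact solution_eq users emoticons
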